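-- pv_equiv track=rewrite | github.com/chongyang-xu/LLMPlanner | tests/templates/test_reduce.py | split_string_n_pieces
-- ===== SOURCE A (Python) =====
-- def split_string_n_pieces(s, n):
--     # Calculate the approximate length of each piece
--     avg_len = len(s) // n
--     remainder = len(s) % n
--     pieces = []
--     start = 0
--
--     for i in range(n):
--         # Distribute the remainder across the first pieces
--         end = start + avg_len + (1 if i < remainder else 0)
--         pieces.append(s[start:end])
--         start = end
--
--     return pieces
-- ===== SOURCE B (Python) =====
-- def split_string_n_pieces(s, n):
--     pieces = []
--     while n > 0:
--         q, r = divmod(len(s), n)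
--         cut = q + (1 if r else 0)
--         pieces.append(s[:cut])
--         s = s[cut:]
--         n -= 1
--     return pieces
-- ===== Notes on version B (the rewrite author's own statement) =====
-- stated objective: alternative
-- what changed: Replaces A's indexed for-loop (one divmod up front, a running start index into the fixed string) by a peel-off loop that recomputes divmod of the REMAINING suffix against the REMAINING piece count each step, takes its first piece and consumes it (s = s[cut:], n -= 1); correctness rests on the identity that divmod(len(s)-cut, n-1) redistributes the remainder exactly as A's single divmod does.
import Mathlib
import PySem

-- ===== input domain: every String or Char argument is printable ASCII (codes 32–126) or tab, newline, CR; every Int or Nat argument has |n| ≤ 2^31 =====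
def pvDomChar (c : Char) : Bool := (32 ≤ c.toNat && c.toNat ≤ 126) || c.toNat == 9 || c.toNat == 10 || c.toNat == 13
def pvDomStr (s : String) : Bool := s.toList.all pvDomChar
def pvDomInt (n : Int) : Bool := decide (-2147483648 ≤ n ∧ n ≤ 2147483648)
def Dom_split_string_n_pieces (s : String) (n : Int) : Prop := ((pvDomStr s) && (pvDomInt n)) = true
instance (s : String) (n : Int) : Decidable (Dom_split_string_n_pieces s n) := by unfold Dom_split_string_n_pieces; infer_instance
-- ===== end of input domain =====

-- B replaces A's iterative running-start loop with a recursive peel-off of the first piece (fresh divmod each level); alternative decomposition, same cost.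
-- ===== PORT A =====
def split_string_n_pieces (s : String) (n : Int) : List String :=
  let avg_len := PySem.Int.floordiv (PySem.Str.len s) n
  let remainder := PySem.Int.mod (PySem.Str.len s) n
  let res := (PySem.List.pyRange 0 n 1).foldl
    (fun (st : List String × Int) i =>
      let e := st.2 + avg_len + (if i < remainder then 1 else 0)
      (st.1 ++ [PySem.Str.slice s (some st.2) (some e)], e))
    ([], 0)
  res.1

-- ===== PORT B =====
-- B's while loop runs the Python int n down to 0; ported as structural recursion on the
-- Nat counter k = n.toNat (each iteration computes the same values as Source B's loop body).
def sspPeel (s : String) (k : Nat) (pieces : List String) : List String :=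
  match k with
  | 0 => pieces
  | m + 1 =>
    let n : Int := ((m + 1 : Nat) : Int)
    let q := PySem.Int.floordiv (PySem.Str.len s) n
    let r := PySem.Int.mod (PySem.Str.len s) n
    let cut := q + (if r ≠ 0 then 1 else 0)
    sspPeel (PySem.Str.slice s (some cut) none) m (pieces ++ [PySem.Str.slice s none (some cut)])

def split_string_n_pieces_alt (s : String) (n : Int) : List String :=
  sspPeel s n.toNat []

-- ===== PRECONDITION & SPEC =====
-- Python's len(s) // n raises ZeroDivisionError at n = 0; both programs return on every other n.
def Pre_split_string_n_pieces (s : String) (n : Int) : Prop := n ≠ 0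
instance (s : String) (n : Int) : Decidable (Pre_split_string_n_pieces s n) := by unfold Pre_split_string_n_pieces; infer_instance
def pvWitness_split_string_n_pieces : String × Int := ("hello world", 3)
def Spec_split_string_n_pieces (s : String) (n : Int) (out : List String) : Prop := out = split_string_n_pieces_alt s n
instance (s : String) (n : Int) (out : List String) : Decidable (Spec_split_string_n_pieces s n out) := by unfold Spec_split_string_n_pieces; infer_instance

-- ===== CLAIM (what is proved, stated in full; the proofs are below) =====
def Claim_equal_split_string_n_pieces : Prop := ∀ (s : String) (n : Int), Dom_split_string_n_pieces s n → Pre_split_string_n_pieces s n → Spec_split_string_n_pieces s n (split_string_n_pieces s n)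

-- ===== LEMMAS AND PROOFS =====

-- A's loop invariant: starting the fold at index a with start = q*a + min a r produces acc ++ the closed-form slices.
theorem foldl_slices (s : String) (q r : Int) (a b : Int) (acc : List String) (h : a ≤ b) :
    (PySem.List.pyRange a b 1).foldl
      (fun (st : List String × Int) i =>
        (st.1 ++ [PySem.Str.slice s (some st.2) (some (st.2 + q + if i < r then 1 else 0))],
         st.2 + q + if i < r then 1 else 0))
      (acc, q * a + min a r)
    = (acc ++ (PySem.List.pyRange a b 1).map
        (fun i => PySem.Str.slice s (some (q * i + min i r)) (some (q * (i + 1) + min (i + 1) r))),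
       q * b + min b r) := by
  obtain ⟨k, hk⟩ : ∃ k : Nat, b = a + k := ⟨(b - a).toNat, by omega⟩
  subst hk
  induction k generalizing a acc with
  | zero =>
    rw [PySem.List.pyRange_one_eq_nil (by omega : a + ((0:Nat):Int) ≤ a)]
    rw [List.foldl_nil, List.map_nil, List.append_nil]
    norm_num
  | succ m ih =>
    rw [PySem.List.pyRange_one_cons (by push_cast; omega)]
    simp only [List.foldl_cons, List.map_cons]
    have harith : q * a + min a r + q + (if a < r then 1 else 0)
        = q * (a + 1) + min (a + 1) r := by
      rcases lt_or_ge a r with h1 | h1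
      · simp only [if_pos h1, min_eq_left (by omega : a ≤ r), min_eq_left (by omega : a + 1 ≤ r)]; ring
      · simp only [if_neg (not_lt.mpr h1), min_eq_right (by omega : r ≤ a), min_eq_right (by omega : r ≤ a + 1)]; ring
    rw [harith]
    rw [show (a + (↑(m + 1) : Int)) = a + 1 + ↑m by push_cast; ring]
    rw [ih (a + 1) (acc ++ [PySem.Str.slice s (some (q * a + min a r)) (some (q * (a + 1) + min (a + 1) r))]) (by omega)]
    rw [List.append_assoc]
    rfl

-- slicing a suffix of s is slicing s with shifted bounds (nonnegative bounds)
theorem slice_of_suffix (s : String) (c a b : Int) (hc : 0 ≤ c) (ha : 0 ≤ a) (hb : 0 ≤ b) :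
    PySem.Str.slice (PySem.Str.slice s (some c) none) (some a) (some b)
      = PySem.Str.slice s (some (c + a)) (some (c + b)) := by
  apply String.toList_inj.mp
  simp only [PySem.Str.toList_slice, PySem.Chars.slice_eq_listSlice]
  rw [PySem.List.slice_from _ hc, PySem.List.slice_toNat _ ha hb,
      PySem.List.slice_toNat _ (by omega) (by omega), List.drop_drop]
  congr 1
  · omega
  · congr 1
    omega

-- B's recursion computes the closed-form slices of the original string
set_option maxHeartbeats 1000000 in
theorem peel_closed (k : Nat) : ∀ (s : String) (pieces : List String),
    sspPeel s k pieces
      = pieces ++ (PySem.List.pyRange 0 (k : Int) 1).map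
        (fun i => PySem.Str.slice s
          (some (PySem.Int.floordiv (PySem.Str.len s) (k : Int) * i + min i (PySem.Int.mod (PySem.Str.len s) (k : Int))))
          (some (PySem.Int.floordiv (PySem.Str.len s) (k : Int) * (i + 1) + min (i + 1) (PySem.Int.mod (PySem.Str.len s) (k : Int))))) := by
  induction k with
  | zero =>
    intro s pieces
    rw [PySem.List.pyRange_one_eq_nil (by omega)]
    rw [List.map_nil, List.append_nil]
    rfl
  | succ m ih =>
    intro s pieces
    simp only [sspPeel]
    have hn : (0:Int) < ((m + 1 : Nat) : Int) := by positivity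
    have hLnn : 0 ≤ PySem.Str.len s := by rw [PySem.Str.len_eq]; positivity
    set L : Int := PySem.Str.len s with hL
    set n : Int := ((m + 1 : Nat) : Int) with hndef
    set q : Int := PySem.Int.floordiv L n with hq
    set r : Int := PySem.Int.mod L n with hr
    have hqr : q * n + r = L := PySem.Int.floordiv_mul_add_mod L n
    have hr0 : 0 ≤ r := PySem.Int.mod_nonneg L hn
    have hrn : r < n := PySem.Int.mod_lt L hn
    have hq0 : 0 ≤ q := by
      rw [hq, PySem.Int.floordiv_eq_ediv_of_pos hn]
      exact Int.ediv_nonneg hLnn (le_of_lt hn)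
    have hQM0 : 0 ≤ q * (m : Int) := mul_nonneg hq0 (by positivity)
    have hqn : q * n = q * (m : Int) + q := by rw [hndef]; push_cast; ring
    set cut : Int := q + (if r ≠ 0 then 1 else 0) with hcut
    have hcut0 : 0 ≤ cut := by rw [hcut]; split_ifs <;> omega
    have hcutle : cut ≤ L := by
      rw [hcut]; rw [hqn] at hqr; split_ifs with h <;> omega
    have hlen' : PySem.Str.len (PySem.Str.slice s (some cut) none) = L - cut := by
      rw [PySem.Str.len_eq, PySem.Str.toList_slice, PySem.Chars.slice_eq_listSlice]
      rw [PySem.List.slice_from _ hcut0,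
          List.length_drop]
      rw [hL, PySem.Str.len_eq] at hcutle ⊢
      omega
    rw [ih (PySem.Str.slice s (some cut) none)
          (pieces ++ [PySem.Str.slice s none (some cut)]), hlen']
    rw [show PySem.List.pyRange 0 n 1 = 0 :: PySem.List.pyRange 1 n 1 from
      PySem.List.pyRange_one_cons hn]
    rw [List.map_cons, List.append_assoc, List.singleton_append]
    congr 2
    · -- head piece
      rw [show q * 0 + min 0 r = 0 by simp [min_eq_left hr0],
          show q * (0 + 1) + min (0 + 1) r = cut by rw [hcut]; split_ifs <;> omega]
      apply String.toList_inj.mp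
      simp only [PySem.Str.toList_slice, PySem.Chars.slice_eq_listSlice]
      rw [PySem.List.slice_toNat _ le_rfl hcut0, PySem.List.slice_to _ hcut0]
      simp
    · -- tail pieces
      rcases Nat.eq_zero_or_pos m with hm | hm
      · subst hm
        rw [PySem.List.pyRange_one_eq_nil (by omega),
            PySem.List.pyRange_one_eq_nil (by norm_num)]
        simp
      · have hmpos : (0:Int) < (m : Int) := by exact_mod_cast hm
        have hq' : PySem.Int.floordiv (L - cut) (m : Int) = q := by
          rw [PySem.Int.floordiv_eq_iff_of_pos hmpos,
              show (q + 1) * (m : Int) = q * (m : Int) + (m : Int) by ring]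
          rw [hqn] at hqr
          rw [hcut]; rw [hcut] at hcutle
          constructor <;> (split_ifs at * <;> omega)
        have hr' : PySem.Int.mod (L - cut) (m : Int) = r - (if r ≠ 0 then 1 else 0) := by
          have hdm := PySem.Int.floordiv_mul_add_mod (L - cut) (m : Int)
          rw [hq'] at hdm
          rw [hqn] at hqr
          rw [hcut] at *
          split_ifs at * <;> omega
        rw [hq', hr']
        rw [PySem.List.pyRange_one 0 (m : Int), PySem.List.pyRange_one 1 n]
        rw [show ((m : Int) - 0).toNat = m by omega,
            show (n - 1).toNat = m by rw [hndef]; push_cast; omega]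
        rw [List.map_map, List.map_map]
        apply List.map_congr_left
        intro j _
        simp only [Function.comp_apply, zero_add]
        have hj0 : (0:Int) ≤ (j : Int) := by positivity
        have hQJ0 : 0 ≤ q * (j : Int) := mul_nonneg hq0 hj0
        set rm : Int := r - (if r ≠ 0 then 1 else 0) with hrm
        have hrm0 : 0 ≤ rm := by rw [hrm]; split_ifs <;> omega
        have hA : 0 ≤ q * (j : Int) + min (j : Int) rm := by
          have : 0 ≤ min (j : Int) rm := le_min hj0 hrm0
          omega
        have hB : 0 ≤ q * ((j : Int) + 1) + min ((j : Int) + 1) rm := by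
          have h1 : 0 ≤ q * ((j : Int) + 1) := mul_nonneg hq0 (by omega)
          have h2 : 0 ≤ min ((j : Int) + 1) rm := le_min (by omega) hrm0
          omega
        rw [slice_of_suffix s cut _ _ hcut0 hA hB]
        have hj1 : q * (1 + (j : Int)) = q * (j : Int) + q := by ring
        have hj2 : q * (1 + (j : Int) + 1) = q * ((j : Int) + 1) + q := by ring
        have hj3 : q * ((j : Int) + 1) = q * (j : Int) + q := by ring
        congr 1
        · rw [hj1, hcut, hrm]
          congr 1
          split_ifs <;> omega
        · rw [hj2, hj3, hcut, hrm]
          congr 1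
          split_ifs <;> omega

-- ===== VERDICT (by name: the statement is the Claim_ definition above) =====
theorem split_string_n_pieces_spec : Claim_equal_split_string_n_pieces := by
  intro s n _ hn
  unfold Spec_split_string_n_pieces
  rcases lt_trichotomy n 0 with h | h | h
  · unfold split_string_n_pieces split_string_n_pieces_alt
    rw [PySem.List.pyRange_one_eq_nil (by omega : n ≤ (0:Int))]
    rw [show n.toNat = 0 by omega]
    rfl
  · exact absurd h hn
  · have hrem : 0 ≤ PySem.Int.mod (PySem.Str.len s) n := PySem.Int.mod_nonneg _ h
    unfold split_string_n_pieces
    have key := foldl_slices s (PySem.Int.floordiv (PySem.Str.len s) n)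
      (PySem.Int.mod (PySem.Str.len s) n) 0 n [] (by omega)
    rw [show PySem.Int.floordiv (PySem.Str.len s) n * 0 + min 0 (PySem.Int.mod (PySem.Str.len s) n) = 0 by
      rw [min_eq_left hrem]; ring] at key
    simp only []
    rw [key]
    unfold split_string_n_pieces_alt
    rw [peel_closed n.toNat s [], Int.toNat_of_nonneg (le_of_lt h), List.nil_append]
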